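-- pv_equiv track=rewrite | github.com/jimmylin/aes_scrape | scrape.py | get_max_teams
-- ===== SOURCE A (Python) =====
-- def get_max_teams(divisions):
--     for div in divisions:
--         if "open" in div.get("description", "").lower():
--             return div.get("maximumTeams", "N/A")
--     for div in divisions:
--         if "boys" in div.get("description", "").lower():
--             return div.get("maximumTeams", "N/A")
--     for div in divisions:
--         if "mixed" in div.get("description", "").lower():
--             return div.get("maximumTeams", "N/A")
--     return "N/A"
-- ===== SOURCE B (Python) =====
-- def get_max_teams(divisions):
--     boys = None
--     mixed = None
--     for div in divisions:
--         desc = div.get("description", "").lower()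
--         if "open" in desc:
--             return div.get("maximumTeams", "N/A")
--         if boys is None and "boys" in desc:
--             boys = div.get("maximumTeams", "N/A")
--         if mixed is None and "mixed" in desc:
--             mixed = div.get("maximumTeams", "N/A")
--     if boys is not None:
--         return boys
--     if mixed is not None:
--         return mixed
--     return "N/A"
-- ===== Notes on version B (the rewrite author's own statement) =====
-- stated objective: alternative
-- what changed: Replaces A's three sequential scans (one per keyword) with a single pass that lowercases each description once, returns immediately on 'open', and records the first 'boys'/'mixed' hits in sentinel variables resolved after the loop.
import Mathlib
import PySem

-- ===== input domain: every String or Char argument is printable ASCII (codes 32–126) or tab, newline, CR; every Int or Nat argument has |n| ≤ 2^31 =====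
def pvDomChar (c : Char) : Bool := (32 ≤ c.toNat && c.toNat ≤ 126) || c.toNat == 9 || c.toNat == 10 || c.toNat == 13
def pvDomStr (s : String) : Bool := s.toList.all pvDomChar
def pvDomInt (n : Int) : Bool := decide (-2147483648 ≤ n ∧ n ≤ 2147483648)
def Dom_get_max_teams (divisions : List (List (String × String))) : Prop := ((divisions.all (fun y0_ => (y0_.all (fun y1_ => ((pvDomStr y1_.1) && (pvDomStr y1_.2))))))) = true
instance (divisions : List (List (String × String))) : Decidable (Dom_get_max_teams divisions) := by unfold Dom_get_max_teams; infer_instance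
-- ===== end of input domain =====

-- B replaces A's three sequential keyword scans by a single pass with first-hit sentinels for boys/mixed (one lowercasing per description).


-- ===== PORT A =====
-- div.get(k, dflt) on the association-list encoding of a Python dict (first match)
def divGet (div : List (String × String)) (k dflt : String) : String :=
  (PySem.Dict.mk div).getD k dflt

def get_max_teams (divisions : List (List (String × String))) : String :=
  match divisions.find? (fun div => PySem.Str.isIn "open" (PySem.Str.lower (divGet div "description" ""))) with
  | some div => divGet div "maximumTeams" "N/A"
  | none =>
    match divisions.find? (fun div => PySem.Str.isIn "boys" (PySem.Str.lower (divGet div "description" ""))) with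
    | some div => divGet div "maximumTeams" "N/A"
    | none =>
      match divisions.find? (fun div => PySem.Str.isIn "mixed" (PySem.Str.lower (divGet div "description" ""))) with
      | some div => divGet div "maximumTeams" "N/A"
      | none => "N/A"

-- ===== PORT B =====
def altGo : List (List (String × String)) → Option String → Option String → String
  | [], boys, mixed =>
    match boys with
    | some b => b
    | none =>
      match mixed with
      | some m => m
      | none => "N/A"
  | div :: rest, boys, mixed =>
    let desc := PySem.Str.lower (divGet div "description" "")
    if PySem.Str.isIn "open" desc then divGet div "maximumTeams" "N/A"
    else
      altGo rest
        (if boys.isNone && PySem.Str.isIn "boys" desc then some (divGet div "maximumTeams" "N/A") else boys)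
        (if mixed.isNone && PySem.Str.isIn "mixed" desc then some (divGet div "maximumTeams" "N/A") else mixed)

def get_max_teams_alt (divisions : List (List (String × String))) : String :=
  altGo divisions none none

-- ===== PRECONDITION & SPEC =====
def Spec_get_max_teams (divisions : List (List (String × String))) (out : String) : Prop := out = get_max_teams_alt divisions
instance (divisions : List (List (String × String))) (out : String) : Decidable (Spec_get_max_teams divisions out) := by unfold Spec_get_max_teams; infer_instance

-- ===== CLAIM (what is proved, stated in full; the proofs are below) =====
def Claim_equal_get_max_teams : Prop := ∀ (divisions : List (List (String × String))), Dom_get_max_teams divisions → Spec_get_max_teams divisions (get_max_teams divisions)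

-- ===== LEMMAS AND PROOFS =====

-- recording a first hit into a pending sentinel commutes with prepending the element to the scan
lemma sentinel_or {a b : Type} (o : Option b) (div : a) (rest : List a) (p : a -> Bool) (f : a -> b) :
    (if o.isNone && p div then some (f div) else o).or ((rest.find? p).map f)
      = o.or (((div :: rest).find? p).map f) := by
  cases o <;> by_cases h : p div = true <;> simp [List.find?_cons_of_pos, List.find?_cons_of_neg, h]

-- invariant of B's single pass: with pending sentinels boys/mixed it computes A's
-- three-scan answer where the sentinels take priority over the remaining list
lemma altGo_eq (l : List (List (String × String))) (boys mixed : Option String) :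
    altGo l boys mixed =
      match l.find? (fun div => PySem.Str.isIn "open" (PySem.Str.lower (divGet div "description" ""))) with
      | some div => divGet div "maximumTeams" "N/A"
      | none =>
        match boys.or ((l.find? (fun div => PySem.Str.isIn "boys" (PySem.Str.lower (divGet div "description" "")))).map (fun div => divGet div "maximumTeams" "N/A")) with
        | some b => b
        | none =>
          match mixed.or ((l.find? (fun div => PySem.Str.isIn "mixed" (PySem.Str.lower (divGet div "description" "")))).map (fun div => divGet div "maximumTeams" "N/A")) with
          | some m => m
          | none => "N/A" := by
  induction l generalizing boys mixed with
  | nil => cases boys <;> cases mixed <;> simp [altGo]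
  | cons div rest ih =>
    simp only [altGo]
    by_cases hOpen : PySem.Str.isIn "open" (PySem.Str.lower (divGet div "description" "")) = true
    · rw [if_pos hOpen, List.find?_cons_of_pos (p := fun div => PySem.Str.isIn "open" (PySem.Str.lower (divGet div "description" ""))) hOpen]
    · rw [if_neg hOpen, List.find?_cons_of_neg (p := fun div => PySem.Str.isIn "open" (PySem.Str.lower (divGet div "description" ""))) hOpen, ih,
        sentinel_or boys div rest (fun div => PySem.Str.isIn "boys" (PySem.Str.lower (divGet div "description" ""))) (fun d => divGet d "maximumTeams" "N/A"),
        sentinel_or mixed div rest (fun div => PySem.Str.isIn "mixed" (PySem.Str.lower (divGet div "description" ""))) (fun d => divGet d "maximumTeams" "N/A")]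

-- ===== VERDICT (by name: the statement is the Claim_ definition above) =====
theorem get_max_teams_spec : Claim_equal_get_max_teams := by
  intro divisions _
  unfold Spec_get_max_teams get_max_teams get_max_teams_alt
  rw [altGo_eq]
  simp only [Option.none_or]
  cases hO : List.find? (fun div => PySem.Str.isIn "open" (PySem.Str.lower (divGet div "description" ""))) divisions <;>
    cases hB : List.find? (fun div => PySem.Str.isIn "boys" (PySem.Str.lower (divGet div "description" ""))) divisions <;>
    cases hM : List.find? (fun div => PySem.Str.isIn "mixed" (PySem.Str.lower (divGet div "description" ""))) divisions <;>
    simp [hO, hB, hM]
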